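-- pv_equiv track=rewrite | github.com/bendudz/Advent_of_code_2020 | Day06.py | part2
-- ===== SOURCE A (Python) =====
-- from copy import deepcopy
-- from typing import List, Set
--
-- def part2(groups: List[str]) -> int:
--     answer_count = []
--     for group in groups:
--         split_group = group.strip().split('\n')
--         group_answers = [list(survey) for survey in split_group]
--         unique_answers = find_common_answers(group_answers)
--         answer_count.append(len(unique_answers))
--
--     return sum(answer_count)
--
-- def find_common_answers(group_answers: List) -> Set:
--     const = deepcopy(group_answers[0])
--     for i in range(len(group_answers) - 1):
--         const = set(const).intersection(group_answers[i + 1])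
--     return const
-- ===== SOURCE B (Python) =====
-- def part2(groups):
--     total = 0
--     for group in groups:
--         lines = group.strip().split('\n')
--         n = len(lines)
--         counts = {}
--         for line in lines:
--             for c in set(line):
--                 counts[c] = counts.get(c, 0) + 1
--         total += sum(1 for v in counts.values() if v == n)
--     return total
-- ===== Notes on version B (the rewrite author's own statement) =====
-- stated objective: alternative
-- what changed: Replaces A's iterative fold of set.intersection over successive lines with a count-and-threshold tabulation: count for each letter how many lines of the group contain it and keep the letters whose count equals the number of lines.
-- intended difference: On inputs containing a group whose stripped text has no newline and repeated letters, A returns the single line's length with duplicates double-counted (its no-iteration fold never converts the list to a set), while B counts each distinct common letter once, which is the intended 'questions everyone answered yes' count. — e.g. on part2(["aa"]): A returns 2, B returns 1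
import Mathlib
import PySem

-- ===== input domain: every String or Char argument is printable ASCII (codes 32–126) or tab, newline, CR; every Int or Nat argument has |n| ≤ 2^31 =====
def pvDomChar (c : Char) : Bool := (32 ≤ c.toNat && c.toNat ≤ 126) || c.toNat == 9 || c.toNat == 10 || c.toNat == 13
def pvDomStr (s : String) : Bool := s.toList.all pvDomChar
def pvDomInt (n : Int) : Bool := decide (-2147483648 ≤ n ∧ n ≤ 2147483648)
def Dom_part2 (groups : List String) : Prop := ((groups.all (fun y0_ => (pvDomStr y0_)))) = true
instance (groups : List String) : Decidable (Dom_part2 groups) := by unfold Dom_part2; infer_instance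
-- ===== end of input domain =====

-- B replaces A's fold of set.intersection by a count-and-threshold tabulation (different algorithm, same cost);
-- on single-line groups with repeated letters A double-counts duplicates and B counts distinct letters (see D_part2).

-- ===== PORT A =====
-- Port of A's helper find_common_answers. 'group_answers[0]' would raise IndexError on [],
-- but every caller passes the result of str.split('\n'), which is nonempty, so the [] branch is unreachable.
def findCommonAnswers (groupAnswers : List (List Char)) : List Char :=
  match groupAnswers with
  | [] => []
  | h :: t => t.foldl (fun const line => PySem.Set.inter (PySem.Set.ofList const) line) h

def part2 (groups : List String) : Int :=
  let answerCount : List Int := groups.foldl (fun acc group =>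
    -- group.strip().split('\n'); [list(survey) for survey in …] is the identity at the List Char level
    let groupAnswers := PySem.Chars.splitOn (PySem.Str.strip group).toList ['\n']
    let uniqueAnswers := findCommonAnswers groupAnswers
    acc ++ [(uniqueAnswers.length : Int)]) []
  answerCount.sum

-- ===== PORT B =====
def part2_alt (groups : List String) : Int :=
  groups.foldl (fun total group =>
    let lines := PySem.Chars.splitOn (PySem.Str.strip group).toList ['\n']
    let n := lines.length
    let counts := lines.foldl (fun counts line =>
      (PySem.Set.ofList line).foldl (fun counts c => counts.insert c (counts.getD c 0 + 1)) counts)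
      (PySem.Dict.empty : PySem.Dict Char Int)
    total + ((counts.values.filter (fun v => v == (n : Int))).length : Int)) 0

-- ===== PRECONDITION & SPEC =====
-- On inputs containing a group whose stripped text has no newline and repeated letters, A returns the
-- single line's length with duplicates double-counted, while B counts each distinct common letter once,
-- which is the intended 'questions everyone answered yes' count.
def D_part2 (groups : List String) : Prop :=
  ∃ g ∈ groups,
    (PySem.Chars.splitOn (PySem.Str.strip g).toList ['\n']).length = 1 ∧
    ¬((PySem.Chars.splitOn (PySem.Str.strip g).toList ['\n']).headD []).Nodup
instance (groups : List String) : Decidable (D_part2 groups) := by unfold D_part2; infer_instance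

def Spec_part2 (groups : List String) (out : Int) : Prop := ¬ D_part2 groups → out = part2_alt groups
instance (groups : List String) (out : Int) : Decidable (Spec_part2 groups out) := by unfold Spec_part2; infer_instance

def pvDiffWitness_part2 : List String := ["aa"]
def pvDiffWitnessOut_part2 : Int × Int := (2, 1)

-- ===== CLAIM =====
def Claim_unchanged_part2 : Prop := ∀ (groups : List String), Dom_part2 groups → Spec_part2 groups (part2 groups)
def Claim_changed_part2 : Prop := Dom_part2 (pvDiffWitness_part2) ∧ D_part2 (pvDiffWitness_part2) ∧ part2 (pvDiffWitness_part2) = pvDiffWitnessOut_part2.1 ∧ part2_alt (pvDiffWitness_part2) = pvDiffWitnessOut_part2.2 ∧ pvDiffWitnessOut_part2.1 ≠ pvDiffWitnessOut_part2.2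
def Claim_exact_part2 : Prop := ∀ (groups : List String), Dom_part2 groups → D_part2 groups → part2 groups ≠ part2_alt groups

-- ===== LEMMAS AND PROOFS =====

-- proof-only abbreviations for the per-group values
def aGroupVal (lines : List (List Char)) : Int := ((findCommonAnswers lines).length : Int)

def bGroupVal (lines : List (List Char)) : Int :=
  (((lines.foldl (fun counts line =>
      (PySem.Set.ofList line).foldl (fun counts c => counts.insert c (counts.getD c 0 + 1)) counts)
      (PySem.Dict.empty : PySem.Dict Char Int)).values.filter
        (fun v => v == (lines.length : Int))).length : Int)

def linesOf (g : String) : List (List Char) := PySem.Chars.splitOn (PySem.Str.strip g).toList ['\n']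

-- A's intersection fold, from a duplicate-free start: result is duplicate-free and
-- contains exactly the elements of the start present in every remaining line.
theorem foldInter_spec (t : List (List Char)) (c : List Char) (hc : c.Nodup) :
    (t.foldl (fun const line => PySem.Set.inter (PySem.Set.ofList const) line) c).Nodup ∧
    ∀ y, (y ∈ t.foldl (fun const line => PySem.Set.inter (PySem.Set.ofList const) line) c ↔
      y ∈ c ∧ ∀ l ∈ t, y ∈ l) := by
  induction t generalizing c with
  | nil => exact ⟨hc, by simp⟩
  | cons x t ih =>
      rw [List.foldl_cons, PySem.Set.ofList_eq_self_of_nodup c hc]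
      obtain ⟨h1, h2⟩ := ih (PySem.Set.inter c x) (PySem.Set.nodup_inter c x hc)
      refine ⟨h1, fun y => ?_⟩
      rw [h2 y, PySem.Set.mem_inter]
      constructor
      · rintro ⟨⟨hyc, hyx⟩, hall⟩
        exact ⟨hyc, by simpa [hyx] using hall⟩
      · rintro ⟨hyc, hall⟩
        exact ⟨⟨hyc, hall x (by simp)⟩, fun l hl => hall l (by simp [hl])⟩

-- counting a letter in the concatenation of the per-line letter sets = number of lines containing it
theorem count_flatMap_ofList (L : List (List Char)) (c : Char) :
    List.count c (L.flatMap (fun l => PySem.Set.ofList l)) = L.countP (fun l => decide (c ∈ l)) := by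
  induction L with
  | nil => simp
  | cons l L ih =>
      rw [List.flatMap_cons, List.count_append, ih, List.countP_cons]
      by_cases h : c ∈ l
      · rw [List.count_eq_one_of_mem (PySem.Set.nodup_ofList l) ((PySem.Set.mem_ofList l c).mpr h)]
        simp [h, Nat.add_comm]
      · rw [List.count_eq_zero_of_not_mem (fun hm => h ((PySem.Set.mem_ofList l c).mp hm))]
        simp [h]

-- B's tabulation value as a filter over the distinct letters of the group
theorem bVal_as_filter (L : List (List Char)) :
    bGroupVal L = ((((PySem.Set.ofList (L.flatMap (fun l => PySem.Set.ofList l))).filter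
      (fun k => ((List.count k (L.flatMap (fun l => PySem.Set.ofList l)) : Int)
        == (L.length : Int)))).length : Int)) := by
  unfold bGroupVal
  set F := L.flatMap (fun l => PySem.Set.ofList l) with hF
  have hcounts : L.foldl (fun counts line =>
      (PySem.Set.ofList line).foldl (fun counts c => counts.insert c (counts.getD c 0 + 1)) counts)
      (PySem.Dict.empty : PySem.Dict Char Int) = PySem.Dict.counter F := by
    rw [hF, ← List.foldl_flatMap]
    exact PySem.Dict.foldl_insert_getD_add_one_eq_counter _
  rw [hcounts]
  have hvals : (PySem.Dict.counter F).values =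
      (PySem.Set.ofList F).map (fun k => ((List.count k F : Int))) := by
    show (PySem.Dict.counter F).items.map Prod.snd = _
    rw [PySem.Dict.items_counter, List.map_map]
    rfl
  rw [hvals, List.filter_map, List.length_map]
  rfl

-- single-line group: B counts the distinct letters of the line
theorem bVal_single (h : List Char) : bGroupVal [h] = ((PySem.Set.ofList h).length : Int) := by
  rw [bVal_as_filter]
  have hflat : ([h] : List (List Char)).flatMap (fun l => PySem.Set.ofList l) = PySem.Set.ofList h := by
    simp
  rw [hflat, PySem.Set.ofList_ofList]
  have : (PySem.Set.ofList h).filter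
      (fun k => ((List.count k (PySem.Set.ofList h) : Int) == ((1 : Nat) : Int))) =
      PySem.Set.ofList h := by
    apply List.filter_eq_self.mpr
    intro a ha
    rw [List.count_eq_one_of_mem (PySem.Set.nodup_ofList h) ha]
    simp
  simp only [List.length_cons, List.length_nil] at *
  rw [this]

-- multi-line group: A's fold value equals B's tabulation value
theorem perGroup_eq (h x : List Char) (t : List (List Char)) :
    aGroupVal (h :: x :: t) = bGroupVal (h :: x :: t) := by
  rw [bVal_as_filter]
  set L := h :: x :: t with hL
  set F := L.flatMap (fun l => PySem.Set.ofList l) with hF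
  have hA := foldInter_spec t (PySem.Set.inter (PySem.Set.ofList h) x)
    (PySem.Set.nodup_inter _ _ (PySem.Set.nodup_ofList h))
  have hBnd : ((PySem.Set.ofList F).filter
      (fun k => ((List.count k F : Int) == (L.length : Int)))).Nodup :=
    (PySem.Set.nodup_ofList F).filter _
  have hmem : ∀ y, y ∈ t.foldl (fun const line => PySem.Set.inter (PySem.Set.ofList const) line)
      (PySem.Set.inter (PySem.Set.ofList h) x) ↔
      y ∈ (PySem.Set.ofList F).filter
        (fun k => ((List.count k F : Int) == (L.length : Int))) := by
    intro y
    rw [(hA.2 y), List.mem_filter]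
    constructor
    · rintro ⟨hyc, hall⟩
      rw [PySem.Set.mem_inter, PySem.Set.mem_ofList] at hyc
      refine ⟨?_, ?_⟩
      · rw [PySem.Set.mem_ofList, hF, List.mem_flatMap]
        exact ⟨h, by simp [hL], (PySem.Set.mem_ofList h y).mpr hyc.1⟩
      · have hth : L.countP (fun l => decide (y ∈ l)) = L.length := by
          rw [List.countP_eq_length]
          intro l hl
          rw [hL, List.mem_cons, List.mem_cons] at hl
          rcases hl with rfl | rfl | hl
          · simpa using hyc.1
          · simpa using hyc.2
          · simpa using hall l hl
        simp only [beq_iff_eq]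
        rw [hF, count_flatMap_ofList]
        exact_mod_cast hth
    · rintro ⟨_, hcnt⟩
      rw [hF, count_flatMap_ofList] at hcnt
      have hcount : L.countP (fun l => decide (y ∈ l)) = L.length := by
        have := beq_iff_eq.mp hcnt
        exact_mod_cast this
      have hall := List.countP_eq_length.mp hcount
      have hmemall : ∀ l ∈ L, y ∈ l := fun l hl => by simpa using hall l hl
      refine ⟨?_, fun l hl => hmemall l (by simp [hL, hl])⟩
      rw [PySem.Set.mem_inter, PySem.Set.mem_ofList]
      exact ⟨hmemall h (by simp [hL]), hmemall x (by simp [hL])⟩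
  have hperm := (List.perm_ext_iff_of_nodup hA.1 hBnd).mpr hmem
  have := hperm.length_eq
  rw [show aGroupVal (h :: x :: t)
        = ((t.foldl (fun const line => PySem.Set.inter (PySem.Set.ofList const) line)
            (PySem.Set.inter (PySem.Set.ofList h) x)).length : Int) from rfl]
  exact_mod_cast this

-- distinct-letter count vs raw length
theorem ofList_length_eq_dedup (h : List Char) :
    (PySem.Set.ofList h).length = h.dedup.length := by
  have hperm : (PySem.Set.ofList h).Perm h.dedup :=
    (List.perm_ext_iff_of_nodup (PySem.Set.nodup_ofList h) h.nodup_dedup).mpr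
      (fun y => by rw [PySem.Set.mem_ofList, List.mem_dedup])
  exact hperm.length_eq

theorem bVal_le_aVal (lines : List (List Char)) : bGroupVal lines ≤ aGroupVal lines := by
  match lines with
  | [] => simp [bGroupVal, aGroupVal, findCommonAnswers]
  | [h] =>
      rw [bVal_single]
      show _ ≤ ((h.length : Nat) : Int)
      have := ofList_length_eq_dedup h
      have hle : h.dedup.length ≤ h.length := h.dedup_sublist.length_le
      omega
  | h :: x :: t => exact le_of_eq (perGroup_eq h x t).symm

theorem bVal_lt_aVal_of_dup (h : List Char) (hd : ¬ h.Nodup) : bGroupVal [h] < aGroupVal [h] := by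
  rw [bVal_single]
  show _ < ((h.length : Nat) : Int)
  have heq := ofList_length_eq_dedup h
  have hne : h.dedup ≠ h := fun he => hd (List.dedup_eq_self.mp he)
  have hlt : h.dedup.length < h.length :=
    lt_of_le_of_ne h.dedup_sublist.length_le (fun hl => hne (h.dedup_sublist.eq_of_length hl))
  omega

-- both ports as sums of per-group values
theorem part2_as_sum (groups : List String) :
    part2 groups = (groups.map (fun g => aGroupVal (linesOf g))).sum := by
  unfold part2
  rw [PySem.List.foldl_append_singleton_eq_map]
  rfl

theorem part2_alt_as_sum (groups : List String) :
    part2_alt groups = (groups.map (fun g => bGroupVal (linesOf g))).sum := by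
  unfold part2_alt
  rw [show (fun (total : Int) (group : String) =>
      let lines := PySem.Chars.splitOn (PySem.Str.strip group).toList ['\n']
      let n := lines.length
      let counts := lines.foldl (fun counts line =>
        (PySem.Set.ofList line).foldl (fun counts c => counts.insert c (counts.getD c 0 + 1)) counts)
        (PySem.Dict.empty : PySem.Dict Char Int)
      total + ((counts.values.filter (fun v => v == (n : Int))).length : Int)) =
      (fun total g => total + bGroupVal (linesOf g)) from rfl]
  rw [PySem.List.foldl_add]
  simp

-- per-group equality outside the change region
theorem perGroup_eq_of_ok (lines : List (List Char))
    (hok : ¬ (lines.length = 1 ∧ ¬ (lines.headD []).Nodup)) :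
    aGroupVal lines = bGroupVal lines := by
  match lines with
  | [] => simp [bGroupVal, aGroupVal, findCommonAnswers]
  | [h] =>
      have hnd : h.Nodup := by
        by_contra hc
        exact hok ⟨rfl, by simpa using hc⟩
      rw [bVal_single, PySem.Set.ofList_eq_self_of_nodup h hnd]
      rfl
  | h :: x :: t => exact perGroup_eq h x t

-- ===== VERDICT =====
theorem part2_spec : Claim_unchanged_part2 := by
  intro groups _ hnd
  show part2 groups = part2_alt groups
  rw [part2_as_sum, part2_alt_as_sum]
  refine congrArg List.sum (List.map_congr_left (fun g hg => ?_))
  refine perGroup_eq_of_ok (linesOf g) (fun hc => hnd ⟨g, hg, hc.1, hc.2⟩)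

theorem part2_changed : Claim_changed_part2 := by unfold Claim_changed_part2; decide

theorem part2_tight : Claim_exact_part2 := by
  intro groups _ hd
  obtain ⟨g, hg, h1, h2⟩ := hd
  have h1 : (linesOf g).length = 1 := h1
  have h2 : ¬ ((linesOf g).headD []).Nodup := h2
  rw [part2_as_sum, part2_alt_as_sum]
  have hlt : (groups.map (fun g => bGroupVal (linesOf g))).sum
      < (groups.map (fun g => aGroupVal (linesOf g))).sum := by
    apply List.sum_lt_sum
    · intro g' _; exact bVal_le_aVal (linesOf g')
    · refine ⟨g, hg, ?_⟩
      obtain ⟨h, hh⟩ : ∃ h, linesOf g = [h] := by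
        cases hL : linesOf g with
        | nil => rw [hL] at h1; simp at h1
        | cons a t =>
            cases t with
            | nil => exact ⟨a, rfl⟩
            | cons b t' => rw [hL] at h1; simp at h1
      rw [hh]
      rw [hh] at h2
      exact bVal_lt_aVal_of_dup h (by simpa using h2)
  omega
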